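-- pv_equiv track=rewrite | github.com/jfvitas/ProteoSphereV2 | scripts/affinity_interaction_preview_support.py | iter_sql_insert_tuples
-- ===== SOURCE A (Python) =====
-- def iter_sql_insert_tuples(line: str) -> list[str]:
--     tuples: list[str] = []
--     in_quote = False
--     escape = False
--     depth = 0
--     start = -1
--     for index, char in enumerate(line):
--         if in_quote:
--             if escape:
--                 escape = False
--             elif char == "\\":
--                 escape = True
--             elif char == "'":
--                 in_quote = False
--             continue
--         if char == "'":
--             in_quote = True
--             continue
--         if char == "(":
--             if depth == 0:
--                 start = index
--             depth += 1
--             continue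
--         if char == ")":
--             if depth == 0:
--                 continue
--             depth -= 1
--             if depth == 0 and start >= 0:
--                 tuples.append(line[start : index + 1])
--                 start = -1
--     return tuples
-- ===== SOURCE B (Python) =====
-- def iter_sql_insert_tuples(line: str) -> list[str]:
--     # pass 1: mark every position handled by the quote machinery
--     mask = []
--     in_quote = False
--     escape = False
--     for ch in line:
--         if in_quote:
--             mask.append(True)
--             if escape:
--                 escape = False
--             elif ch == "\\":
--                 escape = True
--             elif ch == "'":
--                 in_quote = False
--         elif ch == "'":
--             mask.append(True)
--             in_quote = True
--         else:
--             mask.append(False)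
--     # pass 2: parenthesis nesting over unmasked positions only
--     tuples = []
--     depth = 0
--     start = -1
--     for i, ch in enumerate(line):
--         if mask[i]:
--             continue
--         if ch == "(":
--             if depth == 0:
--                 start = i
--             depth += 1
--         elif ch == ")":
--             if depth == 0:
--                 continue
--             depth -= 1
--             if depth == 0 and start >= 0:
--                 tuples.append(line[start:i + 1])
--                 start = -1
--     return tuples
-- ===== Notes on version B (the rewrite author's own statement) =====
-- stated objective: alternative
-- what changed: A's single combined state machine is decomposed into two passes: a first scan builds a boolean mask of positions consumed by the quote/escape machinery, and a second scan handles parenthesis nesting only at unmasked positions.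
import Mathlib
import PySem

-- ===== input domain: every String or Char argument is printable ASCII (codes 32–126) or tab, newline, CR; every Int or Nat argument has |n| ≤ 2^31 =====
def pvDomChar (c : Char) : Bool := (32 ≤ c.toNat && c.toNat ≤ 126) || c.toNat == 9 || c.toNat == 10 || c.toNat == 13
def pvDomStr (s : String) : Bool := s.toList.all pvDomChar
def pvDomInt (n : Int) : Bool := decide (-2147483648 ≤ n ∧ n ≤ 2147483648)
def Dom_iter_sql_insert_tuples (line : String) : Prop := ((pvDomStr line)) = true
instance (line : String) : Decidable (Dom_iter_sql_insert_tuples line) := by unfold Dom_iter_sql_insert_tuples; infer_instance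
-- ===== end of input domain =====

-- B replaces A's single combined state machine by two passes (quote mask, then paren nesting);
-- objective: alternative decomposition, same cost. Equivalence is proved on all inputs (total).

-- ===== PORT A =====
-- A's single loop over enumerate(line) with state (in_quote, escape, depth, start, tuples)
def pvALoop (line : String) : List Char → Nat → Bool → Bool → Nat → Int → List String → List String
  | [], _, _, _, _, _, tuples => tuples
  | c :: rest, i, inq, esc, depth, start, tuples =>
    if inq then
      if esc then pvALoop line rest (i+1) true false depth start tuples
      else if c = '\\' then pvALoop line rest (i+1) true true depth start tuples
      else if c = '\'' then pvALoop line rest (i+1) false esc depth start tuples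
      else pvALoop line rest (i+1) true esc depth start tuples
    else if c = '\'' then pvALoop line rest (i+1) true esc depth start tuples
    else if c = '(' then
      pvALoop line rest (i+1) inq esc (depth+1) (if depth = 0 then (i : Int) else start) tuples
    else if c = ')' then
      if depth = 0 then pvALoop line rest (i+1) inq esc depth start tuples
      else if depth - 1 = 0 ∧ start ≥ 0 then
        pvALoop line rest (i+1) inq esc (depth-1) (-1)
          (tuples ++ [String.ofList (PySem.List.slice line.toList (some start) (some ((i : Int) + 1)))])
      else pvALoop line rest (i+1) inq esc (depth-1) start tuples
    else pvALoop line rest (i+1) inq esc depth start tuples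

def iter_sql_insert_tuples (line : String) : List String :=
  pvALoop line line.toList 0 false false 0 (-1) []

-- ===== PORT B =====
-- pass 1: boolean mask of positions consumed by the quote/escape machinery
def pvMask : List Char → Bool → Bool → List Bool
  | [], _, _ => []
  | c :: rest, inq, esc =>
    if inq then
      true :: (if esc then pvMask rest true false
               else if c = '\\' then pvMask rest true true
               else if c = '\'' then pvMask rest false esc
               else pvMask rest true esc)
    else if c = '\'' then true :: pvMask rest true esc
    else false :: pvMask rest false esc

-- pass 2: parenthesis nesting over unmasked positions only
def pvParen (line : String) : List (Bool × Char) → Nat → Nat → Int → List String → List String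
  | [], _, _, _, tuples => tuples
  | (m, c) :: rest, i, depth, start, tuples =>
    if m then pvParen line rest (i+1) depth start tuples
    else if c = '(' then
      pvParen line rest (i+1) (depth+1) (if depth = 0 then (i : Int) else start) tuples
    else if c = ')' then
      if depth = 0 then pvParen line rest (i+1) depth start tuples
      else if depth - 1 = 0 ∧ start ≥ 0 then
        pvParen line rest (i+1) (depth-1) (-1)
          (tuples ++ [String.ofList (PySem.List.slice line.toList (some start) (some ((i : Int) + 1)))])
      else pvParen line rest (i+1) (depth-1) start tuples
    else pvParen line rest (i+1) depth start tuples

def iter_sql_insert_tuples_alt (line : String) : List String :=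
  pvParen line ((pvMask line.toList false false).zip line.toList) 0 0 (-1) []

-- ===== PRECONDITION & SPEC =====
def Spec_iter_sql_insert_tuples (line : String) (out : List String) : Prop := out = iter_sql_insert_tuples_alt line
instance (line : String) (out : List String) : Decidable (Spec_iter_sql_insert_tuples line out) := by unfold Spec_iter_sql_insert_tuples; infer_instance

-- ===== CLAIM (what is proved, stated in full; the proofs are below) =====
def Claim_equal_iter_sql_insert_tuples : Prop := ∀ (line : String), Dom_iter_sql_insert_tuples line → Spec_iter_sql_insert_tuples line (iter_sql_insert_tuples line)

-- ===== LEMMAS AND PROOFS =====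
theorem pvALoop_eq_pvParen (line : String) (cs : List Char) :
    ∀ (i : Nat) (inq esc : Bool) (depth : Nat) (start : Int) (tuples : List String),
    pvALoop line cs i inq esc depth start tuples
      = pvParen line ((pvMask cs inq esc).zip cs) i depth start tuples := by
  induction cs with
  | nil => intro i inq esc depth start tuples; simp [pvALoop, pvMask, pvParen]
  | cons c rest ih =>
    intro i inq esc depth start tuples
    cases inq with
    | true =>
      cases esc with
      | true => simp [pvALoop, pvMask, pvParen, ih]
      | false =>
        by_cases h1 : c = '\\'
        · simp [pvALoop, pvMask, pvParen, h1, ih]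
        · by_cases h2 : c = '\''
          · simp [pvALoop, pvMask, pvParen, h1, h2, ih]
          · simp [pvALoop, pvMask, pvParen, h1, h2, ih]
    | false =>
      by_cases h2 : c = '\''
      · simp [pvALoop, pvMask, pvParen, h2, ih]
      · by_cases h3 : c = '('
        · simp [pvALoop, pvMask, pvParen, h2, h3, ih]
        · by_cases h4 : c = ')'
          · by_cases h5 : depth = 0
            · simp [pvALoop, pvMask, pvParen, h2, h3, h4, h5, ih]
            · by_cases h6 : depth - 1 = 0 ∧ start ≥ 0
              · simp [pvALoop, pvMask, pvParen, h2, h3, h4, h5, h6, ih]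
              · simp [pvALoop, pvMask, pvParen, h2, h3, h4, h5, h6, ih]
          · simp [pvALoop, pvMask, pvParen, h2, h3, h4, ih]

-- ===== VERDICT (by name: the statement is the Claim_ definition above) =====
theorem iter_sql_insert_tuples_spec : Claim_equal_iter_sql_insert_tuples := by
  intro line _
  unfold Spec_iter_sql_insert_tuples iter_sql_insert_tuples iter_sql_insert_tuples_alt
  exact pvALoop_eq_pvParen line line.toList 0 false false 0 (-1) []
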